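-- pv_equiv track=rewrite | github.com/zabbix/ansible-collection | plugins/module_utils/helper.py | tag_to_dict_transform
-- ===== SOURCE A (Python) =====
-- def tag_to_dict_transform(tags):
--     """
--     The function converts tags into a dictionary,
--     where the key is the tag name and the value is a list of tag values.
--     Example input:
--         [
--             {'tag': 'component', 'value': 'application'},
--             {'tag': 'component', 'value': 'health'},
--             {'tag': 'scope', 'value': 'performance'}
--         ]
--     Example output:
--         {
--             'component': ['application', 'health'],
--             'scope': ['performance']
--         }
--
--     :param tags: list of tag dict
--     :type tags: list
--
--     :rtype: dict
--     :return: converted tags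
--     """
--     result = {}
--     for tag in tags:
--         if tag['tag'] in result:
--             result[tag['tag']].append(tag['value'])
--         else:
--             result[tag['tag']] = [tag['value']]
--
--     return result
-- ===== SOURCE B (Python) =====
-- def tag_to_dict_transform(tags):
--     # Two-pass: collect distinct tag names in first-appearance order, then
--     # gather each name's values with a comprehension.
--     names = list(dict.fromkeys(t['tag'] for t in tags))
--     return {name: [t['value'] for t in tags if t['tag'] == name] for name in names}
-- ===== Notes on version B (the rewrite author's own statement) =====
-- stated objective: idiomatic
-- what changed: Replaces the incremental append-or-create dict loop by a two-pass shape: dict.fromkeys collects the distinct tag names in first-appearance order, then a dict comprehension gathers each name's values in one go.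
import Mathlib
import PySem

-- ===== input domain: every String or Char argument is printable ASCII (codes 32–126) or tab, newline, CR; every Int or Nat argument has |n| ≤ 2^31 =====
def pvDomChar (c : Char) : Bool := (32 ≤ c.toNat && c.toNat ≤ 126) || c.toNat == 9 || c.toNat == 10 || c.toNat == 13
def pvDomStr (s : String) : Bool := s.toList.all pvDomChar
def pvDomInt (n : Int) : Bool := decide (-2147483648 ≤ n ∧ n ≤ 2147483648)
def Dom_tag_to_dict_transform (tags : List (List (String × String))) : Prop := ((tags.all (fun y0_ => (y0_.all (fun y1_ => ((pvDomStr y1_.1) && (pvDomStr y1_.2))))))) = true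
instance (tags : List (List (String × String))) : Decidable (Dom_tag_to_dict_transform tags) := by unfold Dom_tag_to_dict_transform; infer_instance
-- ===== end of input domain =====

-- B replaces A's incremental append-or-create dict loop by a two-pass shape
-- (distinct names first, then gather each name's values); same result, not faster.


-- ===== PORT A =====
-- A: result = {}; for tag in tags: append to result[tag['tag']] or create [tag['value']].
-- tag['tag'] / tag['value'] are dict lookups (none = KeyError, excluded by Pre_; the
-- skip branch is unreachable under Pre_).
def tag_to_dict_transform (tags : List (List (String × String))) : List (String × List String) :=
  (tags.foldl (fun result tag =>
      match (PySem.Dict.ofList tag).get? "tag", (PySem.Dict.ofList tag).get? "value" with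
      | some t, some v =>
          if result.contains t then
            result.modify t [] (fun vs => vs ++ [v])      -- result[tag['tag']].append(tag['value'])
          else
            result.insert t [v]                           -- result[tag['tag']] = [tag['value']]
      | _, _ => result) PySem.Dict.empty).items

-- ===== PORT B =====
-- B: names = list(dict.fromkeys(t['tag'] for t in tags)); then a dict comprehension.
-- t['tag'] / t['value'] as getD "" : exact under Pre_ (key present; KeyError excluded).
def tag_to_dict_transform_alt (tags : List (List (String × String))) : List (String × List String) :=
  let names := PySem.List.dedup (tags.map (fun t => (PySem.Dict.ofList t).getD "tag" ""))
  names.map (fun name =>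
    (name, (tags.filter (fun t => (PySem.Dict.ofList t).getD "tag" "" == name)).map
             (fun t => (PySem.Dict.ofList t).getD "value" "")))

-- ===== PRECONDITION & SPEC =====
-- Pre_ excludes exactly the tags lacking a 'tag' or 'value' key, where Python A raises KeyError.
def Pre_tag_to_dict_transform (tags : List (List (String × String))) : Prop :=
  ∀ tag ∈ tags, "tag" ∈ tag.map Prod.fst ∧ "value" ∈ tag.map Prod.fst
instance (tags : List (List (String × String))) : Decidable (Pre_tag_to_dict_transform tags) := by unfold Pre_tag_to_dict_transform; infer_instance
def pvWitness_tag_to_dict_transform : (List (List (String × String))) :=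
  [[("tag", "component"), ("value", "application")],
   [("tag", "component"), ("value", "health")],
   [("tag", "scope"), ("value", "performance")]]

def Spec_tag_to_dict_transform (tags : List (List (String × String))) (out : List (String × List String)) : Prop := out = tag_to_dict_transform_alt tags
instance (tags : List (List (String × String))) (out : List (String × List String)) : Decidable (Spec_tag_to_dict_transform tags out) := by unfold Spec_tag_to_dict_transform; infer_instance

-- ===== CLAIM (what is proved, stated in full; the proofs are below) =====
def Claim_equal_tag_to_dict_transform : Prop := ∀ (tags : List (List (String × String))), Dom_tag_to_dict_transform tags → Pre_tag_to_dict_transform tags → Spec_tag_to_dict_transform tags (tag_to_dict_transform tags)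

-- ===== LEMMAS AND PROOFS =====

-- name / value of a tag dict, as B computes them (and A too, under Pre_)
def tagName (t : List (String × String)) : String := (PySem.Dict.ofList t).getD "tag" ""
def tagVal (t : List (String × String)) : String := (PySem.Dict.ofList t).getD "value" ""

theorem contains_ofList_iff (t : List (String × String)) (k : String) :
    (PySem.Dict.ofList t).contains k = true ↔ k ∈ t.map Prod.fst := by
  rw [PySem.Dict.contains_iff_mem_keys]
  show k ∈ (PySem.Dict.empty.update t).keys ↔ _
  unfold PySem.Dict.update
  rw [PySem.Dict.keys_foldl_insert_key t Prod.fst (fun _ p => p.2)]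
  simp [PySem.Set.mem_update]

theorem get?_of_pre (t : List (String × String)) (k : String) (h : k ∈ t.map Prod.fst) :
    (PySem.Dict.ofList t).get? k = some ((PySem.Dict.ofList t).getD k "") := by
  have hc : (PySem.Dict.ofList t).contains k = true := (contains_ofList_iff t k).mpr h
  rw [PySem.Dict.contains_eq_isSome_get?] at hc
  obtain ⟨v, hv⟩ := Option.isSome_iff_exists.mp hc
  rw [hv, PySem.Dict.getD_eq_get?_getD, hv]
  rfl

-- Under Pre_, A's loop body is exactly a modify with default []
theorem stepA_eq (t : List (String × String)) (h1 : "tag" ∈ t.map Prod.fst)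
    (h2 : "value" ∈ t.map Prod.fst) (d : PySem.Dict String (List String)) :
    (match (PySem.Dict.ofList t).get? "tag", (PySem.Dict.ofList t).get? "value" with
      | some tk, some v =>
          if d.contains tk then d.modify tk [] (fun vs => vs ++ [v]) else d.insert tk [v]
      | _, _ => d)
    = d.modify (tagName t) [] (fun vs => vs ++ [tagVal t]) := by
  rw [get?_of_pre t "tag" h1, get?_of_pre t "value" h2]
  show (if d.contains (tagName t) then _ else _) = _
  unfold tagName tagVal
  by_cases hc : d.contains ((PySem.Dict.ofList t).getD "tag" "") = true
  · simp [hc]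
  · simp only [Bool.not_eq_true] at hc
    simp [hc, PySem.Dict.modify, PySem.Dict.getD_of_not_contains d [] hc]

-- ===== VERDICT (by name: the statement is the Claim_ definition above) =====
theorem tag_to_dict_transform_spec : Claim_equal_tag_to_dict_transform := by
  intro tags _hdom hpre
  unfold Spec_tag_to_dict_transform tag_to_dict_transform tag_to_dict_transform_alt
  -- A's fold = fold of modify over the (name, value) pairs
  have hA : tags.foldl (fun result tag =>
      match (PySem.Dict.ofList tag).get? "tag", (PySem.Dict.ofList tag).get? "value" with
      | some t, some v =>
          if result.contains t then result.modify t [] (fun vs => vs ++ [v])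
          else result.insert t [v]
      | _, _ => result) PySem.Dict.empty
      = (tags.map (fun t => (tagName t, tagVal t))).foldl
          (fun d p => d.modify p.1 [] (fun vs => vs ++ [p.2])) PySem.Dict.empty := by
    rw [List.foldl_map]
    exact PySem.List.foldl_congr_mem tags _ _ _
      (fun d t ht => stepA_eq t ((hpre t ht).1) ((hpre t ht).2) d)
  rw [hA]
  set pairs := tags.map (fun t => (tagName t, tagVal t)) with hpairs
  set D := pairs.foldl (fun d p => d.modify p.1 [] (fun vs => vs ++ [p.2])) PySem.Dict.empty with hD
  have hnd : D.keys.Nodup := by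
    rw [hD]
    exact PySem.Dict.nodup_keys_foldl_modify_key pairs Prod.fst []
      (fun _ p vs => vs ++ [p.2]) PySem.Dict.empty (by simp)
  have hkeys : D.keys = PySem.List.dedup (tags.map tagName) := by
    rw [hD, PySem.Dict.keys_foldl_modify_key pairs Prod.fst [] (fun _ p vs => vs ++ [p.2])]
    have : pairs.map Prod.fst = tags.map tagName := by
      rw [hpairs, List.map_map]; rfl
    rw [this]
    simp [PySem.List.dedup, PySem.Set.ofList, PySem.Set.update]
  have hgetD : ∀ k, D.getD k [] = (pairs.filter (fun p => p.1 == k)).map (fun p => p.2) := by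
    intro k
    rw [hD, PySem.Dict.getD_foldl_modify_append pairs PySem.Dict.empty k]
    simp
  rw [PySem.Dict.items_eq_map_keys D hnd [], hkeys]
  apply List.map_congr_left
  intro k _
  rw [hgetD k]
  congr 1
  rw [hpairs, List.filter_map, List.map_map]
  rfl
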